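-- pv_equiv track=rewrite | github.com/SybelBlue/SybelBlue | Algorithms/HW5Scratch.py | rest_stops
-- ===== SOURCE A (Python) =====
-- def rest_stops(possible, l):
--     dist = 0
--     i = 0
--     stops = []
--
--     possible.sort()
--
--     if possible[i] - dist > 50:
--         return None
--
--     while i < len(possible) - 1 and possible[i + 1] - dist <= 50:
--         i += 1
--
--     stop = possible[i]
--     stops.append(stop)
--     dist = stop
--     i += 1
--
--     while i < len(possible) and 50 < l - dist:
--         if possible[i] - dist > 100:
--             return None
--
--         while i < len(possible) - 1 and possible[i + 1] - dist <= 100: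
--             i += 1
--
--         stop = possible[i]
--         stops.append(stop)
--         dist = stop
--         i += 1
--
--     if l - dist > 50:
--         return None
--     else:
--         return stops
-- ===== SOURCE B (Python) =====
-- def rest_stops(possible, l):
--     # Binary search for each greedy pick instead of A's linear index walks.
--     # Like A, sorts `possible` in place and raises IndexError on an empty list.
--     possible.sort()
--
--     def last_le(x):
--         # index of the last element <= x (bisect_right(possible, x) - 1)
--         lo, hi = 0, len(possible)
--         while lo < hi:
--             mid = (lo + hi) // 2
--             if possible[mid] <= x:
--                 lo = mid + 1
--             else:
--                 hi = mid
--         return lo - 1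
--
--     if possible[0] > 50:
--         return None
--
--     j = last_le(50)
--     dist = possible[j]
--     stops = [dist]
--     i = j + 1
--
--     while i < len(possible) and l - dist > 50:
--         if possible[i] - dist > 100:
--             return None
--         j = last_le(dist + 100)
--         dist = possible[j]
--         stops.append(dist)
--         i = j + 1
--
--     return None if l - dist > 50 else stops
-- ===== Notes on version B (the rewrite author's own statement) =====
-- stated objective: alternative
-- what changed: Each of A's inner linear index walks (advancing one stop at a time while the next stop is within range) is replaced by a hand-written binary search for the last stop within range on the sorted list; the greedy outer loop keeps only (dist, stops, i). Like A, B sorts the argument in place.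
-- outside the precondition, e.g. on rest_stops([], 10): A raises IndexError, B raises IndexError
import Mathlib
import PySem

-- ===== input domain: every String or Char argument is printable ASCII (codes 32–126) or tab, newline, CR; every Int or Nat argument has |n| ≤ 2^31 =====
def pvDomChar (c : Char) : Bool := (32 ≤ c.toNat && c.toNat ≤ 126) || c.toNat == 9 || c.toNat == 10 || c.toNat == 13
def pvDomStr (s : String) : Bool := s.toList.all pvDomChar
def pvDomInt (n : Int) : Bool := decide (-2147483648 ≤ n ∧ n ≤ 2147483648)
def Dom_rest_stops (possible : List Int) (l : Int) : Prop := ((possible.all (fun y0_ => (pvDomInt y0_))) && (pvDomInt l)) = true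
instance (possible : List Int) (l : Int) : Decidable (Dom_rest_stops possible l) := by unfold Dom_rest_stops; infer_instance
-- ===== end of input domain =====

-- B replaces A's inner linear walks by binary searches for the last reachable stop (objective: alternative).
-- Both Pythons sort `possible` IN PLACE; the equivalence proved here is about the return value.

-- ===== PORT A =====
-- inner `while i < len(possible)-1 and possible[i+1]-dist <= bound: i += 1`
-- (i < len-1 over Python ints equals i+1 < len here since i, len ≥ 0; every access is guarded in range, so getD is exact)
def restA_inner (p : List Int) (dist bound : Int) (i : Nat) : Nat :=
  if i + 1 < p.length ∧ p.getD (i+1) 0 - dist ≤ bound then restA_inner p dist bound (i+1) else i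
termination_by p.length - i

theorem restA_inner_ge (p : List Int) (dist bound : Int) (i : Nat) :
    i ≤ restA_inner p dist bound i := by
  fun_induction restA_inner p dist bound i with
  | case1 _ _ ih => omega
  | case2 => omega

-- outer `while i < len(possible) and 50 < l - dist: …` plus the trailing `if l - dist > 50`
def restA_loop (p : List Int) (l dist : Int) (stops : List Int) (i : Nat) : Option (List Int) :=
  if h : i < p.length ∧ 50 < l - dist then
    if p.getD i 0 - dist > 100 then none
    else
      let j := restA_inner p dist 100 i
      let stop := p.getD j 0
      restA_loop p l stop (stops ++ [stop]) (j+1)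
  else if l - dist > 50 then none else some stops
termination_by p.length - i
decreasing_by
  have := restA_inner_ge p dist 100 i; omega

def rest_stops (possible : List Int) (l : Int) : Option (List Int) :=
  let dist : Int := 0
  let p := PySem.List.sorted possible (fun x => x)
  if p.getD 0 0 - dist > 50 then none
  else
    let i := restA_inner p dist 50 0
    let stop := p.getD i 0
    restA_loop p l stop [stop] (i+1)

-- ===== PORT B =====
-- hand-written bisect_right loop from Source B (lo, hi bounds; `(lo+hi)//2` on naturals is exact)
def altSearch (p : List Int) (x : Int) (lo hi : Nat) : Nat :=
  if lo < hi then
    let mid := (lo + hi) / 2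
    if p.getD mid 0 ≤ x then altSearch p x (mid+1) hi else altSearch p x lo mid
  else lo
termination_by hi - lo
decreasing_by all_goals omega

-- Source B's `last_le`: returns lo - 1; at every call Source B makes, lo ≥ 1, so Nat subtraction is exact there
def altLastLe (p : List Int) (x : Int) : Nat := altSearch p x 0 p.length - 1

-- Source B's while loop; fuel only makes the recursion total (each real iteration strictly increases i,
-- so fuel = p.length at the initial call is never exhausted)
def altLoop (p : List Int) (l dist : Int) (stops : List Int) (i : Nat) : Nat → Option (List Int)
  | 0 => none
  | fuel + 1 =>
    if i < p.length ∧ l - dist > 50 then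
      if p.getD i 0 - dist > 100 then none
      else
        let j := altLastLe p (dist + 100)
        let d := p.getD j 0
        altLoop p l d (stops ++ [d]) (j+1) fuel
    else if l - dist > 50 then none else some stops

def rest_stops_alt (possible : List Int) (l : Int) : Option (List Int) :=
  let p := PySem.List.sorted possible (fun x => x)
  if p.getD 0 0 > 50 then none
  else
    let j := altLastLe p 50
    let dist := p.getD j 0
    altLoop p l dist [dist] (j+1) p.length

-- ===== PRECONDITION & SPEC =====
-- Pre_ excludes only the empty list, on which both Pythons raise IndexError at `possible[0]`.
def Pre_rest_stops (possible : List Int) (l : Int) : Prop := possible ≠ []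
instance (possible : List Int) (l : Int) : Decidable (Pre_rest_stops possible l) := by
  unfold Pre_rest_stops; infer_instance

def pvWitness_rest_stops : List Int × Int := ([10, 60], 100)

def Spec_rest_stops (possible : List Int) (l : Int) (out : Option (List Int)) : Prop := out = rest_stops_alt possible l
instance (possible : List Int) (l : Int) (out : Option (List Int)) : Decidable (Spec_rest_stops possible l out) := by unfold Spec_rest_stops; infer_instance

-- ===== CLAIM (what is proved, stated in full; the proofs are below) =====
def Claim_equal_rest_stops : Prop := ∀ (possible : List Int) (l : Int), Dom_rest_stops possible l → Pre_rest_stops possible l → Spec_rest_stops possible l (rest_stops possible l)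

-- ===== LEMMAS AND PROOFS =====

-- number of elements ≤ x
def pvCountLe (p : List Int) (x : Int) : Nat := p.countP (fun a => decide (a ≤ x))

theorem pvCountLe_le_length (p : List Int) (x : Int) : pvCountLe p x ≤ p.length :=
  List.countP_le_length

-- on a sorted list, `p[k] ≤ x` iff `k < pvCountLe p x`
theorem sorted_le_iff_lt_countLe (p : List Int) (hs : p.Pairwise (· ≤ ·)) (x : Int)
    (k : Nat) (hk : k < p.length) : p.getD k 0 ≤ x ↔ k < pvCountLe p x := by
  induction p generalizing k with
  | nil => simp at hk
  | cons a t ih =>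
    rcases List.pairwise_cons.mp hs with ⟨ha, ht⟩
    by_cases hax : a ≤ x
    · cases k with
      | zero => simp [pvCountLe, hax]
      | succ k =>
        have hk' : k < t.length := by simpa using hk
        have hstep : (a :: t).getD (k+1) 0 = t.getD k 0 := rfl
        have hcount : pvCountLe (a :: t) x = pvCountLe t x + 1 := by
          simp [pvCountLe, hax]
        rw [hstep, hcount, ih ht k hk']
        omega
    · have hc : pvCountLe (a :: t) x = 0 := by
        simp only [pvCountLe, List.countP_eq_zero]
        intro b hb
        simp only [decide_eq_true_eq]
        rcases List.mem_cons.mp hb with rfl | hbt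
        · omega
        · have := ha b hbt; omega
      rw [hc]
      cases k with
      | zero => simpa using hax
      | succ k =>
        have hk' : k < t.length := by simpa using hk
        have hstep : (a :: t).getD (k+1) 0 = t.getD k 0 := rfl
        rw [hstep]
        constructor
        · intro hle
          exfalso
          have hmem : t[k] ∈ t := List.getElem_mem _
          have h2 := ha _ hmem
          rw [List.getD_eq_getElem t 0 hk'] at hle
          omega
        · omega

theorem restA_inner_eq (p : List Int) (dist bound : Int) (i : Nat)
    (hs : p.Pairwise (· ≤ ·)) (hi : i < p.length) (hle : p.getD i 0 ≤ dist + bound) :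
    restA_inner p dist bound i = pvCountLe p (dist + bound) - 1 := by
  fun_induction restA_inner p dist bound i with
  | case1 i h ih =>
    exact ih (by omega) (by have := h.2; omega)
  | case2 i h =>
    have hiC : i < pvCountLe p (dist + bound) :=
      (sorted_le_iff_lt_countLe p hs _ i hi).mp hle
    have hCle : pvCountLe p (dist + bound) ≤ i + 1 := by
      by_cases h1 : i + 1 < p.length
      · have h2 : ¬ p.getD (i+1) 0 - dist ≤ bound := by tauto
        have : ¬ (i + 1 < pvCountLe p (dist + bound)) := by
          intro hc
          exact h2 (by have := (sorted_le_iff_lt_countLe p hs _ (i+1) h1).mpr hc; omega)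
        omega
      · have := pvCountLe_le_length p (dist + bound); omega
    omega

theorem altSearch_eq (p : List Int) (x : Int) (lo hi : Nat)
    (hs : p.Pairwise (· ≤ ·)) (hhi : hi ≤ p.length)
    (hlo : lo ≤ pvCountLe p x) (hC : pvCountLe p x ≤ hi) :
    altSearch p x lo hi = pvCountLe p x := by
  fun_induction altSearch p x lo hi with
  | case1 lo hi h mid hmid ih =>
    have hmlen : (lo + hi) / 2 < p.length := by omega
    have := (sorted_le_iff_lt_countLe p hs x ((lo + hi) / 2) hmlen).mp hmid
    exact ih hhi (by omega) hC
  | case2 lo hi h mid hmid ih =>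
    have hmlen : (lo + hi) / 2 < p.length := by omega
    have : ¬ ((lo + hi) / 2 < pvCountLe p x) := fun hc =>
      hmid ((sorted_le_iff_lt_countLe p hs x ((lo + hi) / 2) hmlen).mpr hc)
    exact ih (by omega) hlo (by omega)
  | case3 lo hi h => omega

theorem altLastLe_eq (p : List Int) (x : Int) (hs : p.Pairwise (· ≤ ·)) :
    altLastLe p x = pvCountLe p x - 1 := by
  unfold altLastLe
  rw [altSearch_eq p x 0 p.length hs le_rfl (Nat.zero_le _) (pvCountLe_le_length p x)]

theorem loop_eq (p : List Int) (l : Int) (hs : p.Pairwise (· ≤ ·)) :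
    ∀ (fuel : Nat) (i : Nat) (dist : Int) (stops : List Int),
    p.length - i < fuel →
    restA_loop p l dist stops i = altLoop p l dist stops i fuel := by
  intro fuel
  induction fuel with
  | zero => intro i dist stops h; omega
  | succ fuel ih =>
    intro i dist stops hfi
    rw [restA_loop, altLoop]
    by_cases hg : i < p.length ∧ 50 < l - dist
    · have hg' : i < p.length ∧ l - dist > 50 := ⟨hg.1, hg.2⟩
      rw [dif_pos hg, if_pos hg']
      by_cases hb : p.getD i 0 - dist > 100
      · rw [if_pos hb, if_pos hb]
      · rw [if_neg hb, if_neg hb]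
        have hle : p.getD i 0 ≤ dist + 100 := by omega
        have hinner := restA_inner_eq p dist 100 i hs hg.1 hle
        have hlast := altLastLe_eq p (dist + 100) hs
        have hiC : i < pvCountLe p (dist + 100) :=
          (sorted_le_iff_lt_countLe p hs _ i hg.1).mp hle
        have hCle := pvCountLe_le_length p (dist + 100)
        have hjj : restA_inner p dist 100 i = altLastLe p (dist + 100) := by
          rw [hinner, hlast]
        simp only [hjj]
        exact ih _ _ _ (by rw [hlast]; omega)
    · have hg' : ¬ (i < p.length ∧ l - dist > 50) := by
        intro hc; exact hg ⟨hc.1, hc.2⟩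
      rw [dif_neg hg, if_neg hg']

-- ===== VERDICT (by name: the statement is the Claim_ definition above) =====
theorem rest_stops_spec : Claim_equal_rest_stops := by
  intro possible l _hdom hpre
  unfold Spec_rest_stops rest_stops rest_stops_alt
  set p := PySem.List.sorted possible (fun x => x) with hp
  have hs : p.Pairwise (· ≤ ·) := PySem.List.sorted_pairwise possible (fun x => x)
  have hpnil : p ≠ [] := by
    rw [hp]
    simpa [PySem.List.sorted_eq_nil_iff] using hpre
  have hlen : 0 < p.length := List.length_pos_iff.mpr hpnil
  simp only [sub_zero]
  by_cases h0 : p.getD 0 0 > 50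
  · rw [if_pos h0, if_pos h0]
  · rw [if_neg h0, if_neg h0]
    have hle : p.getD 0 0 ≤ 0 + 50 := by omega
    have hinner := restA_inner_eq p 0 50 0 hs hlen hle
    have hlast : altLastLe p 50 = pvCountLe p 50 - 1 := altLastLe_eq p 50 hs
    norm_num at hinner
    have hC1 : 0 < pvCountLe p 50 := by
      have hx := (sorted_le_iff_lt_countLe p hs 50 0 hlen).mp (by omega)
      omega
    have hjj : restA_inner p 0 50 0 = altLastLe p 50 := by rw [hinner, hlast]
    simp only [hjj]
    exact loop_eq p l hs p.length _ _ _ (by rw [hlast]; omega)
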